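-- pv_equiv track=rewrite | github.com/epayet/advent-of-code | advent/twentytwentyfive/day3.py | get_max_joltage
-- ===== SOURCE A (Python) =====
-- def get_max_joltage(bank: str) -> int:
--     """
--     was good enough for part 1
--     we could use the v2 with specifying max_length to 2
--     """
--     max_first_digit = 0
--     max_first_digit_location = 0
--     for i, digit in enumerate(bank[:-1]):
--         int_digit = int(digit)
--         if int_digit > max_first_digit:
--             max_first_digit = int_digit
--             max_first_digit_location = i
--
--     max_right_digit = 0
--     for right_digit in bank[max_first_digit_location+1:]:
--         int_right_digit = int(right_digit)
--         if int_right_digit > max_right_digit: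
--             max_right_digit = int_right_digit
--
--     return int(str(max_first_digit) + str(max_right_digit))
-- ===== SOURCE B (Python) =====
-- def get_max_joltage(bank: str) -> int:
--     # Single left-to-right pass with a running prefix maximum.
--     if len(bank) < 2:
--         return 0
--     best = 0
--     max_left = int(bank[0])
--     for ch in bank[1:]:
--         d = int(ch)
--         if max_left * 10 + d > best:
--             best = max_left * 10 + d
--         if d > max_left:
--             max_left = d
--     return best
-- ===== Notes on version B (the rewrite author's own statement) =====
-- stated objective: alternative
-- what changed: Replaced A's two passes (find leftmost max tens digit, then rescan the suffix for the max units digit) and its string round-trip int(str(a)+str(b)) by one left-to-right pass keeping a running prefix maximum and the best two-digit candidate, built arithmetically.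
import Mathlib
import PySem

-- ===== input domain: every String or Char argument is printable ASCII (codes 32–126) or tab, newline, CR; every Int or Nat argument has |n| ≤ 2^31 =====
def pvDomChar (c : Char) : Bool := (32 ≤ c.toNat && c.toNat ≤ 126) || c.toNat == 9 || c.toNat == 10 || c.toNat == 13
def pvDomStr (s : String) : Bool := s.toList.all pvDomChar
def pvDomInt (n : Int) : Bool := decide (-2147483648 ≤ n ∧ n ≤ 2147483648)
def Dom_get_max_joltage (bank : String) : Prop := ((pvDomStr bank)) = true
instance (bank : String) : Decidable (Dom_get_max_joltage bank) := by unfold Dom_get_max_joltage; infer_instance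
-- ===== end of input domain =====

-- B replaces A's two scans (leftmost max tens digit, then max digit to its right) and the
-- int(str(a)+str(b)) round-trip by one pass with a running prefix maximum, combined arithmetically.

-- int(c) for a one-character string, shared primitive wrapper (none = ValueError, excluded by Pre_)
def pvD (c : Char) : Int := (PySem.Int.ofChars? [c]).getD 0

-- ===== PORT A =====
def get_max_joltage (bank : String) : Int :=
  let cs := bank.toList
  -- for i, digit in enumerate(bank[:-1]): track (max_first_digit, max_first_digit_location)
  let s1 := (PySem.List.enumerate (PySem.List.slice cs none (some (-1))) 0).foldl
    (fun (st : Int × Int) p =>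
      let int_digit := pvD p.2
      if int_digit > st.1 then (int_digit, p.1) else st) (0, 0)
  -- for right_digit in bank[max_first_digit_location+1:]
  let max_right_digit := (PySem.List.slice cs (some (s1.2 + 1)) none).foldl
    (fun m c =>
      let ir := pvD c
      if ir > m then ir else m) 0
  -- int(str(max_first_digit) + str(max_right_digit))
  (PySem.Int.ofChars? (PySem.Int.toChars s1.1 ++ PySem.Int.toChars max_right_digit)).getD 0

-- ===== PORT B =====
def get_max_joltage_alt (bank : String) : Int :=
  match bank.toList with
  | c0 :: c1 :: rest =>
    -- best = 0, max_left = int(bank[0]); one pass over bank[1:]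
    ((c1 :: rest).foldl (fun (st : Int × Int) ch =>
        let d := pvD ch
        let best := if st.2 * 10 + d > st.1 then st.2 * 10 + d else st.1
        let ml := if d > st.2 then d else st.2
        (best, ml)) (0, pvD c0)).1
  | _ => 0  -- len(bank) < 2

-- ===== PRECONDITION & SPEC =====
-- A raises ValueError (int of a non-digit) on any string of length ≥ 2 containing a non-digit
-- character; strings of length ≤ 1 are never parsed and return 0.
def Pre_get_max_joltage (bank : String) : Prop :=
  bank.toList.length ≤ 1 ∨ bank.toList.all Char.isDigit = true
instance (bank : String) : Decidable (Pre_get_max_joltage bank) := by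
  unfold Pre_get_max_joltage; infer_instance
def pvWitness_get_max_joltage : String := "42"

def Spec_get_max_joltage (bank : String) (out : Int) : Prop := out = get_max_joltage_alt bank
instance (bank : String) (out : Int) : Decidable (Spec_get_max_joltage bank out) := by
  unfold Spec_get_max_joltage; infer_instance

-- ===== CLAIM (what is proved, stated in full; the proofs are below) =====
def Claim_equal_get_max_joltage : Prop := ∀ (bank : String), Dom_get_max_joltage bank →
  Pre_get_max_joltage bank → Spec_get_max_joltage bank (get_max_joltage bank)

-- ===== LEMMAS AND PROOFS =====

-- A's first loop (running maximum with the index of its leftmost attainment)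
def pvLoop1 (init : Int × Int) (l : List (Int × Char)) : Int × Int :=
  l.foldl (fun st p => let int_digit := pvD p.2; if int_digit > st.1 then (int_digit, p.1) else st) init

-- B's candidate list: tens = running prefix maximum, units = current value
def pvT (m : Int) : List Int → List Int
  | [] => []
  | v :: vs => (m * 10 + v) :: pvT (max m v) vs

lemma if_gt_eq_max (x y : Int) : (if x > y then x else y) = max y x := by
  rw [max_def]; split_ifs <;> omega

lemma pvD_bounds (c : Char) (h : c.isDigit = true) : 0 ≤ pvD c ∧ pvD c ≤ 9 := by
  obtain ⟨hl, hu⟩ : 48 ≤ c.toNat ∧ c.toNat ≤ 57 := by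
    simp [Char.isDigit, UInt32.le_iff_toNat_le] at h
    exact ⟨h.1, h.2⟩
  have hc : c = Char.ofNat c.toNat := (Char.ofNat_toNat c).symm
  set m := c.toNat with hm
  clear_value m
  subst hc
  interval_cases m <;> exact (by decide)

-- int(str(a) + str(b)) = 10*a + b for single-digit a, b
lemma concat10 (a b : Int) (ha0 : 0 ≤ a) (ha9 : a ≤ 9) (hb0 : 0 ≤ b) (hb9 : b ≤ 9) :
    (PySem.Int.ofChars? (PySem.Int.toChars a ++ PySem.Int.toChars b)).getD 0 = 10 * a + b := by
  interval_cases a <;> interval_cases b <;> decide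

lemma foldl_max_le (t : List Int) (a c : Int) (ha : a ≤ c) (ht : ∀ x ∈ t, x ≤ c) :
    t.foldl max a ≤ c := by
  induction t generalizing a with
  | nil => simpa
  | cons x xs ih =>
      simp only [List.foldl_cons]
      exact ih (max a x) (max_le ha (ht x (by simp))) (fun y hy => ht y (by simp [hy]))

lemma foldl_max_zero_mem (xs : List Int) (hne : xs ≠ []) (hnn : ∀ x ∈ xs, 0 ≤ x) :
    xs.foldl max 0 ∈ xs := by
  rcases PySem.List.foldl_max_mem xs 0 with h | h
  · rw [h]
    rcases xs with _ | ⟨x, xs⟩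
    · exact absurd rfl hne
    · have hx0 : x ≤ (x :: xs).foldl max 0 := (PySem.List.le_foldl_max _ _).2 x (by simp)
      rw [h] at hx0
      have : x = 0 := le_antisymm hx0 (hnn x (by simp))
      simp [this]
  · exact h

lemma loop1_spec (ws : List Char) (k m0 l0 : Int) :
    (pvLoop1 (m0, l0) (PySem.List.enumerate ws k)).1 = (ws.map pvD).foldl max m0 ∧
    (pvLoop1 (m0, l0) (PySem.List.enumerate ws k) = (m0, l0) ∨
      ∃ j : Nat, ∃ hj : j < ws.length,
        (pvLoop1 (m0, l0) (PySem.List.enumerate ws k)).2 = k + j ∧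
        pvD (ws[j]) = (pvLoop1 (m0, l0) (PySem.List.enumerate ws k)).1 ∧
        m0 < (pvLoop1 (m0, l0) (PySem.List.enumerate ws k)).1 ∧
        ∀ j' : Nat, (hj' : j' < j) → pvD (ws[j']'(Nat.lt_trans hj' hj)) < (pvLoop1 (m0, l0) (PySem.List.enumerate ws k)).1) := by
  induction ws generalizing k m0 l0 with
  | nil => simp [pvLoop1, PySem.List.enumerate]
  | cons c ws ih =>
      rw [PySem.List.enumerate_cons]
      by_cases hgt : pvD c > m0
      · have step : pvLoop1 (m0, l0) ((k, c) :: PySem.List.enumerate ws (k+1))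
            = pvLoop1 (pvD c, k) (PySem.List.enumerate ws (k+1)) := by
          simp [pvLoop1, hgt]
        rw [step]
        obtain ⟨ih1, ih2⟩ := ih (k+1) (pvD c) k
        constructor
        · rw [ih1]; simp; rw [max_eq_right (le_of_lt hgt)]
        · rcases ih2 with heq | ⟨j, hj, h2, h3, h4, h5⟩
          · right
            refine ⟨0, by simp, ?_, ?_, ?_, ?_⟩
            · rw [heq]; simp
            · rw [heq]; simp
            · rw [heq]; simpa
            · intro j' hj'; omega
          · right
            refine ⟨j + 1, by simpa using hj, ?_, ?_, ?_, ?_⟩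
            · rw [h2]; push_cast; ring
            · simpa using h3
            · exact lt_trans hgt h4
            · intro j' hj'
              match j' with
              | 0 => simpa using h4
              | j'' + 1 => simpa using h5 j'' (by omega)
      · have step : pvLoop1 (m0, l0) ((k, c) :: PySem.List.enumerate ws (k+1))
            = pvLoop1 (m0, l0) (PySem.List.enumerate ws (k+1)) := by
          simp [pvLoop1, hgt]
        rw [step]
        obtain ⟨ih1, ih2⟩ := ih (k+1) m0 l0
        constructor
        · rw [ih1]; simp; rw [max_eq_left (by omega)]
        · rcases ih2 with heq | ⟨j, hj, h2, h3, h4, h5⟩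
          · left; exact heq
          · right
            refine ⟨j + 1, by simpa using hj, ?_, ?_, h4, ?_⟩
            · rw [h2]; push_cast; ring
            · simpa using h3
            · intro j' hj'
              match j' with
              | 0 => simpa using lt_of_le_of_lt (not_lt.mp hgt) h4
              | j'' + 1 => simpa using h5 j'' (by omega)

lemma loop2_eq (ws : List Char) (a : Int) :
    ws.foldl (fun m c => let ir := pvD c; if ir > m then ir else m) a
      = (ws.map pvD).foldl max a := by
  simp only [if_gt_eq_max, List.foldl_map]

lemma pvT_length (m : Int) (vs : List Int) : (pvT m vs).length = vs.length := by
  induction vs generalizing m with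
  | nil => rfl
  | cons v vs ih => simp [pvT, ih]

lemma pvT_getElem (m : Int) (vs : List Int) (j : Nat) (hj : j < vs.length) :
    (pvT m vs)[j]'(by rw [pvT_length]; exact hj)
      = (vs.take j).foldl max m * 10 + vs[j] := by
  induction vs generalizing m j with
  | nil => simp at hj
  | cons v vs ih =>
      match j with
      | 0 => simp [pvT]
      | j + 1 => simpa [pvT] using ih (max m v) j (by simpa using hj)

lemma loopB_spec (ws : List Char) (b m : Int) :
    (ws.foldl (fun (st : Int × Int) ch =>
        let d := pvD ch
        let best := if st.2 * 10 + d > st.1 then st.2 * 10 + d else st.1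
        let ml := if d > st.2 then d else st.2
        (best, ml)) (b, m)).1 = (pvT m (ws.map pvD)).foldl max b := by
  induction ws generalizing b m with
  | nil => rfl
  | cons c ws ih =>
      simp only [List.foldl_cons, List.map_cons, pvT, List.foldl_cons]
      rw [show (if pvD c > m then pvD c else m) = max m (pvD c) from if_gt_eq_max _ _,
          show (if m * 10 + pvD c > b then m * 10 + pvD c else b) = max b (m * 10 + pvD c) from if_gt_eq_max _ _]
      exact ih _ _

-- the central identity: A's "leftmost max tens digit then max units digit to its right"
-- equals the maximum of B's prefix-max candidates
lemma core (v0 : Int) (tl : List Int)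
    (hv : ∀ v ∈ v0 :: tl, 0 ≤ v ∧ v ≤ 9)
    (jl : Nat) (hjl : jl + 1 < (v0 :: tl).length)
    (hM : (v0 :: tl)[jl]'(by omega) = ((v0 :: tl).dropLast).foldl max 0)
    (hstrict : ∀ j' : Nat, (h : j' < jl) →
      (v0 :: tl)[j']'(by omega) < ((v0 :: tl).dropLast).foldl max 0) :
    10 * ((v0 :: tl).dropLast).foldl max 0 + ((v0 :: tl).drop (jl + 1)).foldl max 0
      = (pvT v0 tl).foldl max 0 := by
  set vs := v0 :: tl with hvs
  set M := (vs.dropLast).foldl max 0 with hMdef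
  set u := (vs.drop (jl + 1)).foldl max 0 with hudef
  have hlen : vs.length = tl.length + 1 := by simp [hvs]
  have hb : ∀ (i : Nat) (h : i < vs.length), 0 ≤ vs[i] ∧ vs[i] ≤ 9 :=
    fun i h => hv _ (List.getElem_mem h)
  have hdl_mem : ∀ (i : Nat) (h : i + 1 < vs.length), vs[i]'(by omega) ≤ M := by
    intro i h
    have hi' : i < vs.dropLast.length := by simp [List.length_dropLast]; omega
    have := (PySem.List.le_foldl_max vs.dropLast 0).2 (vs.dropLast[i]) (List.getElem_mem hi')
    rwa [List.getElem_dropLast] at this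
  have hM0 : 0 ≤ M := (PySem.List.le_foldl_max _ _).1
  have hM9 : M ≤ 9 := foldl_max_le _ _ _ (by norm_num)
    (fun x hx => (hv x (List.dropLast_subset _ hx)).2)
  have hu0 : 0 ≤ u := (PySem.List.le_foldl_max _ _).1
  have hu9 : u ≤ 9 := foldl_max_le _ _ _ (by norm_num)
    (fun x hx => (hv x (List.drop_subset _ _ hx)).2)
  have pm_le : ∀ (j : Nat), j < tl.length → (tl.take j).foldl max v0 ≤ M := by
    intro j hj
    apply foldl_max_le
    · have := hdl_mem 0 (by omega)
      simpa [hvs] using this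
    · intro x hx
      obtain ⟨i, hi, rfl⟩ := List.mem_iff_getElem.mp hx
      rw [List.getElem_take]
      have hib : i < j := by simpa using (by exact lt_of_lt_of_le hi (by simp))
      have := hdl_mem (i + 1) (by omega)
      simpa [hvs] using this
  have M_le_pm : ∀ (j : Nat), j < tl.length → jl ≤ j → M ≤ (tl.take j).foldl max v0 := by
    intro j hj hjle
    rcases Nat.eq_zero_or_pos jl with h0 | hpos
    · subst h0
      have hv0 : v0 = M := by simpa [hvs] using hM
      rw [← hv0]
      exact (PySem.List.le_foldl_max _ _).1
    · obtain ⟨i, rfl⟩ := Nat.exists_eq_succ_of_ne_zero (by omega : jl ≠ 0)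
      have hti : tl[i]'(by omega) = M := by simpa [hvs] using hM
      have hmem : tl[i]'(by omega) ∈ tl.take j := by
        have hi' : i < (tl.take j).length := by simp; omega
        have : (tl.take j)[i]'(hi') = tl[i]'(by omega) := List.getElem_take
        exact this ▸ List.getElem_mem hi'
      rw [← hti]
      exact (PySem.List.le_foldl_max _ _).2 _ hmem
  have hBgeA : 10 * M + u ≤ (pvT v0 tl).foldl max 0 := by
    have hdne : vs.drop (jl + 1) ≠ [] := by
      have : (vs.drop (jl + 1)).length = vs.length - (jl + 1) := List.length_drop
      intro hc; rw [hc] at this; simp at this; omega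
    have humem : u ∈ vs.drop (jl + 1) :=
      foldl_max_zero_mem _ hdne (fun x hx => (hv x (List.drop_subset _ _ hx)).1)
    obtain ⟨k, hk, hku⟩ := List.mem_iff_getElem.mp humem
    rw [List.getElem_drop] at hku
    have hklen : jl + 1 + k < vs.length := by
      have : (vs.drop (jl + 1)).length = vs.length - (jl + 1) := List.length_drop
      omega
    set j := jl + k with hjdef
    have hjtl : j < tl.length := by omega
    have htlj : tl[j]'(hjtl) = u := by
      have : vs[j + 1]'(by omega) = tl[j]'(hjtl) := by simp [hvs]
      rw [← this, ← hku]; congr 1; omega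
    have hpm : (tl.take j).foldl max v0 = M :=
      le_antisymm (pm_le j hjtl) (M_le_pm j hjtl (by omega))
    have hcand : (pvT v0 tl)[j]'(by rw [pvT_length]; exact hjtl)
        = (tl.take j).foldl max v0 * 10 + tl[j]'(hjtl) := pvT_getElem _ _ _ _
    have hmem : M * 10 + u ∈ pvT v0 tl := by
      rw [← hpm, ← htlj]
      exact hcand ▸ List.getElem_mem _
    have := (PySem.List.le_foldl_max (pvT v0 tl) 0).2 _ hmem
    omega
  have hBleA : (pvT v0 tl).foldl max 0 ≤ 10 * M + u := by
    apply foldl_max_le _ _ _ (by omega)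
    intro t ht
    obtain ⟨j, hj, rfl⟩ := List.mem_iff_getElem.mp ht
    have hjtl : j < tl.length := by rwa [pvT_length] at hj
    rw [pvT_getElem _ _ _ hjtl]
    set pm := (tl.take j).foldl max v0 with hpmdef
    have hpmle : pm ≤ M := pm_le j hjtl
    have htlb : 0 ≤ tl[j]'(hjtl) ∧ tl[j]'(hjtl) ≤ 9 := by
      have := hb (j + 1) (by omega)
      simpa [hvs] using this
    by_cases hpm : pm = M
    · have hjlj : jl ≤ j := by
        rcases PySem.List.foldl_max_mem (tl.take j) v0 with hc | hc
        · by_contra hlt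
          have h0jl : 0 < jl := by omega
          have := hstrict 0 h0jl
          rw [show (vs[0]'(by omega)) = v0 from by simp [hvs]] at this
          have hveq : v0 = M := by rw [← hc, ← hpmdef]; exact hpm
          omega
        · obtain ⟨i, hi, hie⟩ := List.mem_iff_getElem.mp hc
          rw [List.getElem_take] at hie
          have hij : i < j := by simp at hi; omega
          by_contra hlt
          have hi1 : i + 1 < jl := by omega
          have := hstrict (i + 1) hi1
          rw [show (vs[i+1]'(by omega)) = tl[i]'(by omega) from by simp [hvs]] at this
          rw [hie, ← hpmdef, hpm] at this
          exact lt_irrefl _ this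
      have hjle : tl[j]'(hjtl) ≤ u := by
        have hidx : jl + 1 + (j - jl) < vs.length := by omega
        have hdlen : j - jl < (vs.drop (jl + 1)).length := by
          have : (vs.drop (jl + 1)).length = vs.length - (jl + 1) := List.length_drop
          omega
        have hget : (vs.drop (jl + 1))[j - jl]'(hdlen) = vs[jl + 1 + (j - jl)]'(hidx) :=
          List.getElem_drop
        have hvj : vs[jl + 1 + (j - jl)]'(hidx) = tl[j]'(hjtl) := by
          have heq : jl + 1 + (j - jl) = j + 1 := by omega
          simp only [heq]
          simp [hvs]
        have hmem : tl[j]'(hjtl) ∈ vs.drop (jl + 1) := by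
          rw [← hvj, ← hget]; exact List.getElem_mem _
        exact (PySem.List.le_foldl_max _ _).2 _ hmem
      rw [hpm]; omega
    · have : pm < M := lt_of_le_of_ne hpmle hpm
      have hpm0 : v0 ≤ pm := (PySem.List.le_foldl_max _ _).1
      omega
  omega

lemma portA_eq (bank : String) :
    get_max_joltage bank =
      (PySem.Int.ofChars? (PySem.Int.toChars
          (pvLoop1 (0, 0) (PySem.List.enumerate (bank.toList.dropLast) 0)).1
        ++ PySem.Int.toChars
          (((PySem.List.slice bank.toList
              (some ((pvLoop1 (0, 0) (PySem.List.enumerate (bank.toList.dropLast) 0)).2 + 1)) none).map pvD).foldl max 0))).getD 0 := by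
  simp only [get_max_joltage, pvLoop1, PySem.List.slice_to_neg_one, loop2_eq]

lemma main_eq (c0 c1 : Char) (rest : List Char)
    (hd : (c0 :: c1 :: rest).all Char.isDigit = true) :
    (PySem.Int.ofChars? (PySem.Int.toChars
        (pvLoop1 (0, 0) (PySem.List.enumerate ((c0 :: c1 :: rest).dropLast) 0)).1
      ++ PySem.Int.toChars
        (((PySem.List.slice (c0 :: c1 :: rest)
            (some ((pvLoop1 (0, 0) (PySem.List.enumerate ((c0 :: c1 :: rest).dropLast) 0)).2 + 1)) none).map pvD).foldl max 0))).getD 0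
      = (pvT (pvD c0) ((c1 :: rest).map pvD)).foldl max 0 := by
  have hall : ∀ c ∈ (c0 :: c1 :: rest), c.isDigit = true := by
    simpa [List.all_eq_true] using hd
  have hvb : ∀ v ∈ (c0 :: c1 :: rest).map pvD, 0 ≤ v ∧ v ≤ 9 := by
    intro v hv
    obtain ⟨c, hc, rfl⟩ := List.mem_map.mp hv
    exact pvD_bounds c (hall c hc)
  obtain ⟨h1, h2⟩ := loop1_spec ((c0 :: c1 :: rest).dropLast) 0 0 0
  rw [List.map_dropLast] at h1
  obtain ⟨jl, hjl, hs2, hMat, hstrict⟩ :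
      ∃ jl : Nat, jl + 1 < ((c0 :: c1 :: rest).map pvD).length ∧
        (pvLoop1 (0, 0) (PySem.List.enumerate ((c0 :: c1 :: rest).dropLast) 0)).2 = (jl : Int) ∧
        ((c0 :: c1 :: rest).map pvD)[jl]? = some ((((c0 :: c1 :: rest).map pvD).dropLast).foldl max 0) ∧
        (∀ j' : Nat, j' < jl → ∀ v, ((c0 :: c1 :: rest).map pvD)[j']? = some v →
            v < (((c0 :: c1 :: rest).map pvD).dropLast).foldl max 0) := by
    rcases h2 with heq | ⟨j, hj, e2, e3, e4, e5⟩
    · refine ⟨0, by simp, ?_, ?_, ?_⟩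
      · rw [heq]; simp
      · have hM0' : (((c0 :: c1 :: rest).map pvD).dropLast).foldl max 0 = 0 := by
          rw [← h1, heq]
        have h0 : 0 < ((c0 :: c1 :: rest).map pvD).length := by simp
        have hle : ((c0 :: c1 :: rest).map pvD)[0]
            ≤ (((c0 :: c1 :: rest).map pvD).dropLast).foldl max 0 := by
          have h0' : 0 < ((c0 :: c1 :: rest).map pvD).dropLast.length := by simp
          have := (PySem.List.le_foldl_max (((c0 :: c1 :: rest).map pvD).dropLast) 0).2 _
            (List.getElem_mem h0')
          rwa [List.getElem_dropLast] at this
        have hge : 0 ≤ ((c0 :: c1 :: rest).map pvD)[0] :=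
          (hvb _ (List.getElem_mem h0)).1
        rw [List.getElem?_eq_getElem h0]
        rw [hM0'] at hle ⊢
        exact congrArg some (le_antisymm hle hge)
      · intro j' hj' v hv; omega
    · have hjvs : j + 1 < ((c0 :: c1 :: rest).map pvD).length := by
        simp only [List.length_dropLast] at hj
        simp only [List.length_map]
        simp at hj ⊢
        omega
      refine ⟨j, hjvs, ?_, ?_, ?_⟩
      · rw [e2]; simp
      · have hjm : j < ((c0 :: c1 :: rest).map pvD).length := by omega
        rw [List.getElem?_eq_getElem hjm]
        have hjw : j < ((c0 :: c1 :: rest).dropLast).length := hj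
        have hize : ((c0 :: c1 :: rest).map pvD)[j]'hjm
            = pvD (((c0 :: c1 :: rest).dropLast)[j]'hjw) := by
          rw [List.getElem_map]
          congr 1
          exact (List.getElem_dropLast _).symm
        rw [hize, e3, h1]
      · intro j' hj' v hv
        have hjm : j' < ((c0 :: c1 :: rest).map pvD).length := by omega
        rw [List.getElem?_eq_getElem hjm] at hv
        have hjw : j' < ((c0 :: c1 :: rest).dropLast).length := by omega
        have hize : ((c0 :: c1 :: rest).map pvD)[j']'hjm
            = pvD (((c0 :: c1 :: rest).dropLast)[j']'hjw) := by
          rw [List.getElem_map]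
          congr 1
          exact (List.getElem_dropLast _).symm
        have e5' := e5 j' hj'
        rw [h1] at e5'
        injection hv with hveq
        rw [← hveq, hize]
        exact e5'
  rw [hs2, PySem.List.slice_from _ (by positivity : (0:Int) ≤ (jl : Int) + 1)]
  have htn : ((jl : Int) + 1).toNat = jl + 1 := by omega
  rw [htn, List.map_drop, h1]
  have hM0 : 0 ≤ (((c0 :: c1 :: rest).map pvD).dropLast).foldl max 0 :=
    (PySem.List.le_foldl_max _ _).1
  have hM9 : (((c0 :: c1 :: rest).map pvD).dropLast).foldl max 0 ≤ 9 :=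
    foldl_max_le _ _ _ (by norm_num) (fun x hx => (hvb x (List.dropLast_subset _ hx)).2)
  have hu0 : 0 ≤ ((((c0 :: c1 :: rest).map pvD).drop (jl + 1))).foldl max 0 :=
    (PySem.List.le_foldl_max _ _).1
  have hu9 : ((((c0 :: c1 :: rest).map pvD).drop (jl + 1))).foldl max 0 ≤ 9 :=
    foldl_max_le _ _ _ (by norm_num) (fun x hx => (hvb x (List.drop_subset _ _ hx)).2)
  rw [concat10 _ _ hM0 hM9 hu0 hu9]
  obtain ⟨hjl', hM⟩ := List.getElem?_eq_some_iff.mp hMat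
  simp only [List.map_cons] at hM hjl hstrict hvb ⊢
  exact core (pvD c0) (pvD c1 :: List.map pvD rest) hvb jl hjl hM
    (fun j' h => by
      have hlt : j' < (pvD c0 :: pvD c1 :: List.map pvD rest).length := by
        simp at hjl ⊢
        omega
      exact hstrict j' h _ (List.getElem?_eq_getElem hlt))

-- ===== VERDICT (by name: the statement is the Claim_ definition above) =====
theorem get_max_joltage_spec : Claim_equal_get_max_joltage := by
  intro bank hdom hpre
  unfold Spec_get_max_joltage
  unfold Pre_get_max_joltage at hpre
  rw [portA_eq]
  unfold get_max_joltage_alt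
  rcases hcs : bank.toList with _ | ⟨c0, rest0⟩
  · rfl
  · rcases rest0 with _ | ⟨c1, rest⟩
    · have e1 : pvLoop1 (0, 0) (PySem.List.enumerate ([c0].dropLast) 0) = (0, 0) := rfl
      rw [e1]
      have e2 : PySem.List.slice [c0] (some ((0, (0:Int)).2 + 1)) none = ([] : List Char) := rfl
      rw [e2]
      rfl
    · rw [hcs] at hpre
      have hd : (c0 :: c1 :: rest).all Char.isDigit = true := by
        rcases hpre with h | h
        · simp at h
        · exact h
      exact (main_eq c0 c1 rest hd).trans (loopB_spec (c1 :: rest) 0 (pvD c0)).symm
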